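-- pv_equiv track=rewrite | github.com/zt-robinson/GreenBook | scripts/seed_hole_yardages.py | has_bad_consecutive_pars
-- ===== SOURCE A (Python) =====
-- def has_bad_consecutive_pars(pars):
--     for i in range(len(pars) - 2):
--         trio = [pars[i], pars[i+1], pars[i+2]]
--         if all(p in (3, 5) for p in trio):
--             return True
--         if trio == [3, 5, 3] or trio == [5, 3, 5]:
--             return True
--     return False
-- ===== SOURCE B (Python) =====
-- def has_bad_consecutive_pars(pars):
--     run = 0
--     for p in pars:
--         if p == 3 or p == 5:
--             run += 1
--             if run >= 3:
--                 return True
--         else: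
--             run = 0
--     return False
-- ===== Notes on version B (the rewrite author's own statement) =====
-- stated objective: simpler
-- what changed: Replaces the index-based sliding three-element window (including its redundant second equality branch, whose patterns are already caught by the membership test) with a single pass over the elements maintaining a run-length counter of consecutive par-3/par-5 values, returning True once the run reaches 3.
import Mathlib
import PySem

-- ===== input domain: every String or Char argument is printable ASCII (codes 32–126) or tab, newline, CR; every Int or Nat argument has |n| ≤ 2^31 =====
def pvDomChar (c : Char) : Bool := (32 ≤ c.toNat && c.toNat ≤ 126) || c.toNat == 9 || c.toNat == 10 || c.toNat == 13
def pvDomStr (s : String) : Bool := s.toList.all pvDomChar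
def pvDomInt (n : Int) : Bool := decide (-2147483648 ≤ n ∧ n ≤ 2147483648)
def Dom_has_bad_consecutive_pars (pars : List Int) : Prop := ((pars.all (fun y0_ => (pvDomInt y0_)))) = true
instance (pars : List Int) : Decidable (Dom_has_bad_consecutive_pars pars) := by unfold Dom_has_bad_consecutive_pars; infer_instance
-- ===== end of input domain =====

-- B replaces A's index-based sliding trio window (whose [3,5,3]/[5,3,5] branch is redundant)
-- with a single pass keeping a run counter of consecutive 3/5 values; objective: simpler.


-- ===== PORT A =====
-- loop body of 'for i in range(len(pars) - 2)': the _,_,_ fallback is unreachable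
-- (every i drawn from the range is in bounds, so pyGet? returns some).
def pvALoop (pars : List Int) : List Int → Bool
  | [] => false
  | i :: rest =>
    match PySem.List.pyGet? pars i, PySem.List.pyGet? pars (i + 1), PySem.List.pyGet? pars (i + 2) with
    | some a, some b, some c =>
      let trio := [a, b, c]
      if trio.all (fun p => p == 3 || p == 5) then true
      else if trio == [3, 5, 3] || trio == [5, 3, 5] then true
      else pvALoop pars rest
    | _, _, _ => false

def has_bad_consecutive_pars (pars : List Int) : Bool :=
  pvALoop pars (PySem.List.pyRange 0 ((pars.length : Int) - 2) 1)

-- ===== PORT B =====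
def pvBLoop : List Int → Int → Bool
  | [], _ => false
  | p :: rest, run =>
    if p == 3 || p == 5 then
      if run + 1 ≥ 3 then true else pvBLoop rest (run + 1)
    else pvBLoop rest 0

def has_bad_consecutive_pars_alt (pars : List Int) : Bool := pvBLoop pars 0

-- ===== PRECONDITION & SPEC =====
def Spec_has_bad_consecutive_pars (pars : List Int) (out : Bool) : Prop := out = has_bad_consecutive_pars_alt pars
instance (pars : List Int) (out : Bool) : Decidable (Spec_has_bad_consecutive_pars pars out) := by unfold Spec_has_bad_consecutive_pars; infer_instance

-- ===== CLAIM (what is proved, stated in full; the proofs are below) =====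
def Claim_equal_has_bad_consecutive_pars : Prop := ∀ (pars : List Int), Dom_has_bad_consecutive_pars pars → Spec_has_bad_consecutive_pars pars (has_bad_consecutive_pars pars)

-- ===== LEMMAS AND PROOFS =====

-- common spec: is there a window of 3 consecutive elements each equal to 3 or 5?
def pvOk (p : Int) : Bool := p == 3 || p == 5

def pvW : List Int → Bool
  | a :: b :: c :: rest => (pvOk a && pvOk b && pvOk c) || pvW (b :: c :: rest)
  | _ => false

theorem pvW_short (l : List Int) (h : l.length < 3) : pvW l = false := by
  match l, h with
  | [], _ => rfl
  | [_], _ => rfl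
  | [_, _], _ => rfl

theorem pvW_cons (a b c : Int) (rest : List Int) :
    pvW (a :: b :: c :: rest) = ((pvOk a && pvOk b && pvOk c) || pvW (b :: c :: rest)) := rfl

-- first-two-ok prefix predicates, for the B-side run-counter invariant
def pvOne : List Int → Bool
  | a :: _ => pvOk a
  | [] => false

def pvTwo : List Int → Bool
  | a :: b :: _ => pvOk a && pvOk b
  | _ => false

theorem pvBLoop_inv (l : List Int) :
    pvBLoop l 0 = pvW l ∧ pvBLoop l 1 = (pvTwo l || pvW l) ∧
    pvBLoop l 2 = (pvOne l || pvTwo l || pvW l) := by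
  induction l with
  | nil => exact ⟨rfl, rfl, rfl⟩
  | cons x r ih =>
    obtain ⟨ih0, ih1, ih2⟩ := ih
    by_cases hx : pvOk x
    · refine ⟨?_, ?_, ?_⟩
      · show (if pvOk x then (if (0:Int)+1 ≥ 3 then true else pvBLoop r 1) else pvBLoop r 0) = _
        rw [if_pos hx, if_neg (by omega), ih1]
        match r with
        | [] => simp [pvW, pvTwo]
        | [b] => simp [pvW, pvTwo]
        | b :: c :: r2 => simp [pvW, pvTwo, hx]
      · show (if pvOk x then (if (1:Int)+1 ≥ 3 then true else pvBLoop r 2) else pvBLoop r 0) = _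
        rw [if_pos hx, if_neg (by omega), ih2]
        match r with
        | [] => simp [pvW, pvTwo, pvOne]
        | [b] => simp [pvW, pvTwo, pvOne, hx]
        | b :: c :: r2 =>
          simp [pvW, pvTwo, pvOne, hx]
          by_cases hb : pvOk b <;> by_cases hc : pvOk c <;> simp [hb, hc]
      · show (if pvOk x then (if (2:Int)+1 ≥ 3 then true else pvBLoop r 2) else pvBLoop r 0) = _
        rw [if_pos hx, if_pos (by omega)]
        simp [pvOne, hx]
    · have hx' : pvOk x = false := by simpa using hx
      refine ⟨?_, ?_, ?_⟩ <;>
      · show (if pvOk x then _ else pvBLoop r 0) = _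
        rw [if_neg hx, ih0]
        match r with
        | [] => simp [pvW, pvTwo, pvOne, hx']
        | [b] => simp [pvW, pvTwo, pvOne, hx']
        | b :: c :: r2 => simp [pvW, pvTwo, pvOne, hx']

theorem pvB_eq_W (l : List Int) : pvBLoop l 0 = pvW l := (pvBLoop_inv l).1

-- A-side: the loop from index i computes pvW of the suffix pars.drop i
theorem pvALoop_eq_W (pars : List Int) (n : Nat) :
    ∀ i : Nat, ((pars.length : Int) - 2 - i).toNat = n →
      pvALoop pars (PySem.List.pyRange i ((pars.length : Int) - 2) 1) = pvW (pars.drop i) := by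
  induction n with
  | zero =>
    intro i hi
    have hle : (pars.length : Int) - 2 ≤ i := by omega
    rw [PySem.List.pyRange_one_eq_nil hle]
    have : (pars.drop i).length < 3 := by
      rw [List.length_drop]; omega
    rw [pvW_short _ this]; rfl
  | succ n ih =>
    intro i hi
    have hlt : (i : Int) < (pars.length : Int) - 2 := by omega
    rw [PySem.List.pyRange_one_cons hlt]
    have h0 : i < pars.length := by omega
    have h1 : i + 1 < pars.length := by omega
    have h2 : i + 2 < pars.length := by omega
    have g0 : PySem.List.pyGet? pars (i : Int) = some pars[i] := by
      rw [PySem.List.pyGet?_natCast]; exact List.getElem?_eq_getElem h0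
    have g1 : PySem.List.pyGet? pars ((i : Int) + 1) = some pars[i + 1] := by
      have : ((i : Int) + 1) = ((i + 1 : Nat) : Int) := by push_cast; ring
      rw [this, PySem.List.pyGet?_natCast]; exact List.getElem?_eq_getElem h1
    have g2 : PySem.List.pyGet? pars ((i : Int) + 2) = some pars[i + 2] := by
      have : ((i : Int) + 2) = ((i + 2 : Nat) : Int) := by push_cast; ring
      rw [this, PySem.List.pyGet?_natCast]; exact List.getElem?_eq_getElem h2
    have hrec : pvALoop pars (PySem.List.pyRange ((i : Int) + 1) ((pars.length : Int) - 2) 1)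
        = pvW (pars.drop (i + 1)) := by
      have : ((i : Int) + 1) = ((i + 1 : Nat) : Int) := by push_cast; ring
      rw [this]; exact ih (i + 1) (by omega)
    have hdrop : pars.drop i = pars[i] :: pars[i + 1] :: pars[i + 2] :: pars.drop (i + 3) := by
      rw [← List.getElem_cons_drop h0, ← List.getElem_cons_drop h1,
          ← List.getElem_cons_drop h2]
    have hdrop1 : pars.drop (i + 1) = pars[i + 1] :: pars[i + 2] :: pars.drop (i + 3) := by
      rw [← List.getElem_cons_drop h1, ← List.getElem_cons_drop h2]
    show pvALoop pars ((i : Int) :: PySem.List.pyRange ((i : Int) + 1) ((pars.length : Int) - 2) 1) = _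
    rw [pvALoop, g0, g1, g2]
    simp only [hdrop, pvW_cons, hdrop1] at *
    set a := pars[i]; set b := pars[i + 1]; set c := pars[i + 2]
    by_cases hall : ([a, b, c].all (fun p => p == 3 || p == 5)) = true
    · rw [if_pos hall]
      have : (pvOk a && pvOk b && pvOk c) = true := by
        simp [pvOk, List.all] at hall ⊢; tauto
      simp [this]
    · rw [if_neg hall]
      have heq : ([a, b, c] == [3, 5, 3] || [a, b, c] == [5, 3, 5]) = false := by
        simp at hall ⊢; tauto
      rw [if_neg (ne_true_of_eq_false heq), hrec]
      have : (pvOk a && pvOk b && pvOk c) = false := by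
        simp [pvOk, List.all] at hall ⊢; tauto
      simp [this]

-- ===== VERDICT (by name: the statement is the Claim_ definition above) =====
theorem has_bad_consecutive_pars_spec : Claim_equal_has_bad_consecutive_pars := by
  intro pars _
  show has_bad_consecutive_pars pars = has_bad_consecutive_pars_alt pars
  rw [has_bad_consecutive_pars_alt, pvB_eq_W]
  have := pvALoop_eq_W pars ((pars.length : Int) - 2 - 0).toNat 0 rfl
  simpa [has_bad_consecutive_pars] using this
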